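-- pv_equiv track=rewrite | github.com/dguo456/jiuzhang | Prefix_Sum前缀和/1840 · Matrix restoration.py | matrixRestoration
-- ===== SOURCE A (Python) =====
-- def matrixRestoration(n, m, after):
--     # 倒序遍历矩阵
--     for i in range(n - 1, -1, -1):
--         for j in range(m - 1, -1, -1):
--             # 减去上面的部分
--             if i > 0:
--                 after[i][j] -= after[i - 1][j]
--             # 减去左面的部分
--             if j > 0:
--                 after[i][j] -= after[i][j - 1]
--             # 加上重复减去的部分
--             if i > 0 and j > 0:
--                 after[i][j] += after[i - 1][j - 1]
--
--     return after
-- ===== SOURCE B (Python) =====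
-- def matrixRestoration(n, m, after):
--     # Invert the 2D prefix sum as two independent 1D difference sweeps
--     # (row-wise backward differences, then column-wise backward differences),
--     # mutating `after` in place like A.
--     for i in range(n):
--         for j in range(m - 1, 0, -1):
--             after[i][j] -= after[i][j - 1]
--     for i in range(n - 1, 0, -1):
--         for j in range(m):
--             after[i][j] -= after[i - 1][j]
--     return after
-- ===== Notes on version B (the rewrite author's own statement) =====
-- stated objective: alternative
-- what changed: Replaces the single reverse-order 2D inclusion-exclusion pass (three conditional updates per cell) with two separate 1D difference sweeps: a row-wise backward difference over each row, then a column-wise backward difference over each column.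
import Mathlib
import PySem

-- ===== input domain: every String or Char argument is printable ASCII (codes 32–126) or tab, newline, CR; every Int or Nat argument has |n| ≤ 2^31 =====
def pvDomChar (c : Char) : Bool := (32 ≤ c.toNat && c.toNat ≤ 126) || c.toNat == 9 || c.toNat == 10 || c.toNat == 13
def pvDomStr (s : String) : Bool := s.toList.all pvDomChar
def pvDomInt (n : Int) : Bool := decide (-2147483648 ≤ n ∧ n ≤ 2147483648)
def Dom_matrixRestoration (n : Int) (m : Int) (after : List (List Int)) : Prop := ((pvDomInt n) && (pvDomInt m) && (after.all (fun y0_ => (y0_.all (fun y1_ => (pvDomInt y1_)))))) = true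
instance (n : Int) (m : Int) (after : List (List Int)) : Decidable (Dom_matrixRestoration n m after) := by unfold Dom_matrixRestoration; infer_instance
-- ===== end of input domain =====

-- ===== PORT A =====
-- B changes the algorithm only (two 1D difference sweeps instead of one 2D
-- inclusion-exclusion pass); both Pythons mutate `after` in place identically,
-- the Lean ports model the returned value.
-- matrix cell read/write helpers shared by both ports (in range under Pre_)
def mget (a : List (List Int)) (i j : Int) : Int := (a.getD i.toNat []).getD j.toNat 0
def mset (a : List (List Int)) (i j : Int) (v : Int) : List (List Int) :=
  a.set i.toNat ((a.getD i.toNat []).set j.toNat v)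

-- one body of A's inner loop: the three conditional in-place updates
def stepA (acc : List (List Int)) (i j : Int) : List (List Int) :=
  let a1 := if 0 < i then mset acc i j (mget acc i j - mget acc (i-1) j) else acc
  let a2 := if 0 < j then mset a1 i j (mget a1 i j - mget a1 i (j-1)) else a1
  if 0 < i ∧ 0 < j then mset a2 i j (mget a2 i j + mget a2 (i-1) (j-1)) else a2

def matrixRestoration (n : Int) (m : Int) (after : List (List Int)) : List (List Int) :=
  (PySem.List.pyRange (n-1) (-1) (-1)).foldl (fun acc i =>
    (PySem.List.pyRange (m-1) (-1) (-1)).foldl (fun acc j => stepA acc i j) acc) after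

-- ===== PORT B =====
def matrixRestoration_alt (n : Int) (m : Int) (after : List (List Int)) : List (List Int) :=
  let a1 := (PySem.List.pyRange 0 n 1).foldl (fun acc i =>
    (PySem.List.pyRange (m-1) 0 (-1)).foldl (fun acc j =>
      mset acc i j (mget acc i j - mget acc i (j-1))) acc) after
  (PySem.List.pyRange (n-1) 0 (-1)).foldl (fun acc i =>
    (PySem.List.pyRange 0 m 1).foldl (fun acc j =>
      mset acc i j (mget acc i j - mget acc (i-1) j)) acc) a1

-- ===== PRECONDITION & SPEC =====
-- Pre_ excludes exactly the inputs where A raises IndexError: when the loops run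
-- (0 < n, 0 < m) and some cell other than (0,0) is visited (1 < n or 1 < m), the
-- matrix must have at least n rows and each of the first n rows at least m columns.
def Pre_matrixRestoration (n : Int) (m : Int) (after : List (List Int)) : Prop :=
  0 < n → 0 < m → 1 < n ∨ 1 < m →
    n ≤ (after.length : Int) ∧ ∀ r ∈ after.take n.toNat, m ≤ (r.length : Int)
instance (n : Int) (m : Int) (after : List (List Int)) : Decidable (Pre_matrixRestoration n m after) := by
  unfold Pre_matrixRestoration; infer_instance
def pvWitness_matrixRestoration : Int × Int × List (List Int) :=
  (2, 2, [[1, 3], [4, 10]])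
def Spec_matrixRestoration (n : Int) (m : Int) (after : List (List Int)) (out : List (List Int)) : Prop := out = matrixRestoration_alt n m after
instance (n : Int) (m : Int) (after : List (List Int)) (out : List (List Int)) : Decidable (Spec_matrixRestoration n m after out) := by unfold Spec_matrixRestoration; infer_instance

-- ===== CLAIM (what is proved, stated in full; the proofs are below) =====
def Claim_equal_matrixRestoration : Prop := ∀ (n : Int) (m : Int) (after : List (List Int)), Dom_matrixRestoration n m after → Pre_matrixRestoration n m after → Spec_matrixRestoration n m after (matrixRestoration n m after)

-- ===== LEMMAS AND PROOFS =====

-- pointwise view of the matrix used by all invariants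
def mgetN (a : List (List Int)) (i j : Nat) : Int := (a.getD i []).getD j 0

-- the value the restored matrix holds at (i, j): 2D inclusion-exclusion over S
def dval (S : List (List Int)) (i j : Nat) : Int :=
  mgetN S i j - (if 0 < i then mgetN S (i-1) j else 0) - (if 0 < j then mgetN S i (j-1) else 0)
    + (if 0 < i ∧ 0 < j then mgetN S (i-1) (j-1) else 0)

theorem foldl_id {α β : Type} (l : List α) (a : β) : l.foldl (fun acc _ => acc) a = a := by
  induction l generalizing a with
  | nil => rfl
  | cons x xs ih => simpa using ih a

theorem getD_set_pv {α : Type} (xs : List α) (i : Nat) (x : α) (k : Nat) (d : α) :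
    (xs.set i x).getD k d = if k = i ∧ i < xs.length then x else xs.getD k d := by
  simp only [List.getD_eq_getElem?_getD, List.getElem?_set]
  split_ifs with h1 h2 h3 h4 <;> simp_all

theorem length_mset (a : List (List Int)) (i j v) : (mset a i j v).length = a.length := by
  simp [mset]

theorem rowlen_mset (a : List (List Int)) (i j v) (k : Nat) :
    ((mset a i j v).getD k []).length = (a.getD k []).length := by
  unfold mset
  rw [getD_set_pv]
  split_ifs with h
  · rw [h.1]; simp
  · rfl

theorem mgetN_mset (a : List (List Int)) (i j : Int) (v : Int) (k l : Nat)
    (hi : i.toNat < a.length) (hj : j.toNat < (a.getD i.toNat []).length) :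
    mgetN (mset a i j v) k l =
      if k = i.toNat ∧ l = j.toNat then v else mgetN a k l := by
  unfold mset mgetN
  rw [getD_set_pv]
  split_ifs with h h2 h3
  · rw [getD_set_pv, if_pos (And.intro h2.2 hj)]
  · rw [getD_set_pv]
    have hne : ¬ (l = j.toNat ∧ j.toNat < (a.getD i.toNat []).length) := by
      intro hc; exact h2 ⟨h.1, hc.1⟩
    rw [if_neg hne, h.1]
  · exact absurd ⟨h3.1, hi⟩ h
  · rfl

theorem mget_eq (a : List (List Int)) (i j : Int) : mget a i j = mgetN a i.toNat j.toNat := rfl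

theorem mset_mset (a : List (List Int)) (i j v w : Int) (hi : i.toNat < a.length) :
    mset (mset a i j v) i j w = mset a i j w := by
  unfold mset
  rw [getD_set_pv, if_pos (And.intro rfl hi), List.set_set, List.set_set]

theorem mset_self (a : List (List Int)) (i j : Int)
    (hi : i.toNat < a.length) (hj : j.toNat < (a.getD i.toNat []).length) :
    mset a i j (mgetN a i.toNat j.toNat) = a := by
  unfold mset mgetN
  have e : a.getD i.toNat [] = a[i.toNat] := List.getD_eq_getElem a [] hi
  rw [e] at hj ⊢
  rw [List.getD_eq_getElem _ 0 hj, List.set_getElem_self hj, List.set_getElem_self hi]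

theorem stepA_desc (acc : List (List Int)) (i j : Int)
    (hi : i.toNat < acc.length) (hj : j.toNat < (acc.getD i.toNat []).length) :
    (stepA acc i j).length = acc.length ∧
    (∀ k, ((stepA acc i j).getD k []).length = (acc.getD k []).length) ∧
    (∀ k l, mgetN (stepA acc i j) k l =
      if k = i.toNat ∧ l = j.toNat then dval acc i.toNat j.toNat else mgetN acc k l) := by
  have hfin : stepA acc i j = mset acc i j (dval acc i.toNat j.toNat) := by
    have hii : 0 < i → (i-1).toNat ≠ i.toNat := by omega
    have hjj : 0 < j → (j-1).toNat ≠ j.toNat := by omega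
    unfold stepA dval
    split_ifs with hI hJ hIJ hJ hIJ <;>
      simp_all [mget_eq, mset_mset, mgetN_mset, length_mset, rowlen_mset, hi, hj] <;>
      first
      | (rw [mset_mset _ _ _ _ _ hi]; congr 1; omega)
      | (congr 1; omega)
      | (exact (mset_self acc i j hi (by rw [List.getD_eq_getElem acc ([]:List Int) hi]; exact hj)).symm)
  refine ⟨?_, ?_, ?_⟩ <;> rw [hfin]
  · exact length_mset acc i j _
  · exact fun k => rowlen_mset acc i j _ k
  · exact fun k l => mgetN_mset acc i j _ k l hi hj



theorem dval_congr (S T : List (List Int)) (i j : Nat)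
    (h1 : mgetN T i j = mgetN S i j)
    (h2 : 0 < i → mgetN T (i-1) j = mgetN S (i-1) j)
    (h3 : 0 < j → mgetN T i (j-1) = mgetN S i (j-1))
    (h4 : 0 < i → 0 < j → mgetN T (i-1) (j-1) = mgetN S (i-1) (j-1)) :
    dval T i j = dval S i j := by
  unfold dval
  by_cases hi : 0 < i <;> by_cases hj : 0 < j <;>
    simp_all

theorem A_inner (i : Int) (J : Nat) : ∀ (acc : List (List Int)),
    i.toNat < acc.length → J ≤ (acc.getD i.toNat []).length →
    ((PySem.List.pyRange ((J:Int) - 1) (-1) (-1)).foldl (fun a j => stepA a i j) acc).length = acc.length ∧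
    (∀ k, (((PySem.List.pyRange ((J:Int) - 1) (-1) (-1)).foldl (fun a j => stepA a i j) acc).getD k []).length = (acc.getD k []).length) ∧
    (∀ k l, mgetN ((PySem.List.pyRange ((J:Int) - 1) (-1) (-1)).foldl (fun a j => stepA a i j) acc) k l =
      if k = i.toNat ∧ l < J then dval acc i.toNat l else mgetN acc k l) := by
  induction J with
  | zero =>
    intro acc hi hJ
    rw [PySem.List.pyRange_neg_one_eq_nil (by omega)]
    simp
  | succ J ih =>
    intro acc hi hJ
    have e : ((J+1:Nat):Int) - 1 = ((J:Nat):Int) := by push_cast; ring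
    rw [e, PySem.List.pyRange_neg_one_cons (by omega), List.foldl_cons]
    obtain ⟨s1, s2, s3⟩ := stepA_desc acc i ((J:Nat):Int) hi (by omega)
    obtain ⟨h1, h2, h3⟩ := ih (stepA acc i ((J:Nat):Int)) (by rw [s1]; exact hi) (by rw [s2]; omega)
    refine ⟨by rw [h1, s1], fun k => by rw [h2, s2], fun k l => ?_⟩
    simp only [Int.toNat_natCast] at s3
    rw [h3 k l]
    by_cases hk : k = i.toNat
    · by_cases hl : l < J
      · rw [if_pos ⟨hk, hl⟩, if_pos ⟨hk, by omega⟩]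
        refine dval_congr _ _ _ _ ?_ ?_ ?_ ?_
        · rw [s3, if_neg (by omega)]
        · intro h0; rw [s3, if_neg (by omega)]
        · intro h0; rw [s3, if_neg (by omega)]
        · intro h0 h0'; rw [s3, if_neg (by omega)]
      · by_cases hl2 : l = J
        · rw [if_neg (by omega), if_pos ⟨hk, by omega⟩, s3, if_pos ⟨hk, hl2⟩, hl2]
        · rw [if_neg (by omega), if_neg (by omega), s3, if_neg (by omega)]
    · rw [if_neg (by omega), if_neg (by omega), s3, if_neg (by omega)]

theorem A_outer (M K : Nat) : ∀ (acc : List (List Int)),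
    K ≤ acc.length → (∀ k, k < K → M ≤ (acc.getD k []).length) →
    ((PySem.List.pyRange ((K:Int) - 1) (-1) (-1)).foldl (fun a i =>
        (PySem.List.pyRange ((M:Int) - 1) (-1) (-1)).foldl (fun a j => stepA a i j) a) acc).length = acc.length ∧
    (∀ k, (((PySem.List.pyRange ((K:Int) - 1) (-1) (-1)).foldl (fun a i =>
        (PySem.List.pyRange ((M:Int) - 1) (-1) (-1)).foldl (fun a j => stepA a i j) a) acc).getD k []).length = (acc.getD k []).length) ∧
    (∀ k l, mgetN ((PySem.List.pyRange ((K:Int) - 1) (-1) (-1)).foldl (fun a i =>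
        (PySem.List.pyRange ((M:Int) - 1) (-1) (-1)).foldl (fun a j => stepA a i j) a) acc) k l =
      if k < K ∧ l < M then dval acc k l else mgetN acc k l) := by
  induction K with
  | zero =>
    intro acc hlen hrow
    rw [PySem.List.pyRange_neg_one_eq_nil (a := ((0:Nat):Int) - 1) (by omega)]
    simp
  | succ K ih =>
    intro acc hlen hrow
    have e : ((K+1:Nat):Int) - 1 = ((K:Nat):Int) := by push_cast; ring
    rw [e, PySem.List.pyRange_neg_one_cons (a := ((K:Nat):Int)) (by omega), List.foldl_cons]
    obtain ⟨s1, s2, s3⟩ := A_inner ((K:Nat):Int) M acc (by omega)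
      (by rw [Int.toNat_natCast]; exact hrow K (by omega))
    simp only [Int.toNat_natCast] at s3
    obtain ⟨h1, h2, h3⟩ := ih (PySem.List.pyRange ((M:Int) - 1) (-1) (-1) |>.foldl
        (fun a j => stepA a ((K:Nat):Int) j) acc)
      (by rw [s1]; omega) (fun k hk => by rw [s2]; exact hrow k (by omega))
    refine ⟨by rw [h1, s1], fun k => by rw [h2, s2], fun k l => ?_⟩
    rw [h3 k l]
    by_cases hk : k < K
    · by_cases hl : l < M
      · rw [if_pos ⟨hk, hl⟩, if_pos ⟨by omega, hl⟩]
        refine dval_congr _ _ _ _ ?_ ?_ ?_ ?_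
        · rw [s3, if_neg (by omega)]
        · intro h0; rw [s3, if_neg (by omega)]
        · intro h0; rw [s3, if_neg (by omega)]
        · intro h0 h0'; rw [s3, if_neg (by omega)]
      · rw [if_neg (by omega), if_neg (by omega), s3, if_neg (by omega)]
    · by_cases hk2 : k = K
      · rw [if_neg (by omega), s3, hk2]
        by_cases hl : l < M
        · rw [if_pos ⟨rfl, hl⟩, if_pos ⟨by omega, hl⟩]
        · rw [if_neg (by omega), if_neg (by omega)]
      · rw [if_neg (by omega), if_neg (by omega), s3, if_neg (by omega)]

theorem B_inner_row (i : Int) (J : Nat) : ∀ (acc : List (List Int)),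
    i.toNat < acc.length → J ≤ (acc.getD i.toNat []).length →
    ((PySem.List.pyRange ((J:Int) - 1) 0 (-1)).foldl (fun a j => mset a i j (mget a i j - mget a i (j-1))) acc).length = acc.length ∧
    (∀ k, (((PySem.List.pyRange ((J:Int) - 1) 0 (-1)).foldl (fun a j => mset a i j (mget a i j - mget a i (j-1))) acc).getD k []).length = (acc.getD k []).length) ∧
    (∀ k l, mgetN ((PySem.List.pyRange ((J:Int) - 1) 0 (-1)).foldl (fun a j => mset a i j (mget a i j - mget a i (j-1))) acc) k l =
      if k = i.toNat ∧ 0 < l ∧ l < J then mgetN acc k l - mgetN acc k (l-1) else mgetN acc k l) := by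
  induction J with
  | zero =>
    intro acc hi hJ
    rw [PySem.List.pyRange_neg_one_eq_nil (a := ((0:Nat):Int) - 1) (by omega)]
    refine ⟨rfl, fun k => rfl, fun k l => ?_⟩
    rw [if_neg (by omega)]
    rfl
  | succ J ih =>
    intro acc hi hJ
    rcases Nat.eq_zero_or_pos J with hJ0 | hJ0
    · subst hJ0
      rw [PySem.List.pyRange_neg_one_eq_nil (a := ((1:Nat):Int) - 1) (by omega)]
      refine ⟨rfl, fun k => rfl, fun k l => ?_⟩
      rw [if_neg (by omega)]
      rfl
    · have e : ((J+1:Nat):Int) - 1 = ((J:Nat):Int) := by push_cast; ring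
      rw [e, PySem.List.pyRange_neg_one_cons (a := ((J:Nat):Int)) (by omega), List.foldl_cons]
      have hjb : ((J:Nat):Int).toNat < (acc.getD i.toNat []).length := by omega
      have s1 := length_mset acc i ((J:Nat):Int) (mget acc i ((J:Nat):Int) - mget acc i (((J:Nat):Int)-1))
      have s2 := rowlen_mset acc i ((J:Nat):Int) (mget acc i ((J:Nat):Int) - mget acc i (((J:Nat):Int)-1))
      have s3 := fun k l => mgetN_mset acc i ((J:Nat):Int) (mget acc i ((J:Nat):Int) - mget acc i (((J:Nat):Int)-1)) k l hi hjb
      simp only [Int.toNat_natCast] at s3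
      obtain ⟨h1, h2, h3⟩ := ih (mset acc i ((J:Nat):Int) (mget acc i ((J:Nat):Int) - mget acc i (((J:Nat):Int)-1)))
        (by rw [s1]; exact hi) (by rw [s2]; omega)
      refine ⟨by rw [h1, s1], fun k => by rw [h2, s2], fun k l => ?_⟩
      rw [h3 k l]
      have ev : mget acc i ((J:Nat):Int) - mget acc i (((J:Nat):Int)-1) = mgetN acc i.toNat J - mgetN acc i.toNat (J-1) := by
        rw [mget_eq, mget_eq, Int.toNat_natCast]
        congr 2
        omega
      by_cases hk : k = i.toNat
      · by_cases hl : 0 < l ∧ l < J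
        · rw [if_pos ⟨hk, hl.1, hl.2⟩, if_pos ⟨hk, hl.1, by omega⟩, s3, if_neg (by omega), s3, if_neg (by omega)]
        · by_cases hl2 : l = J
          · rw [if_neg (by omega), if_pos ⟨hk, by omega, by omega⟩, s3, if_pos ⟨hk, hl2⟩, ev, hk, hl2]
          · rw [if_neg (by omega), if_neg (by omega), s3, if_neg (by omega)]
      · rw [if_neg (by omega), if_neg (by omega), s3, if_neg (by omega)]

theorem B_outer_row (M K : Nat) : ∀ (acc : List (List Int)),
    K ≤ acc.length → (∀ k, k < K → M ≤ (acc.getD k []).length) →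
    ((PySem.List.pyRange 0 (K:Int) 1).foldl (fun a i =>
        (PySem.List.pyRange ((M:Int) - 1) 0 (-1)).foldl (fun a j => mset a i j (mget a i j - mget a i (j-1))) a) acc).length = acc.length ∧
    (∀ k, (((PySem.List.pyRange 0 (K:Int) 1).foldl (fun a i =>
        (PySem.List.pyRange ((M:Int) - 1) 0 (-1)).foldl (fun a j => mset a i j (mget a i j - mget a i (j-1))) a) acc).getD k []).length = (acc.getD k []).length) ∧
    (∀ k l, mgetN ((PySem.List.pyRange 0 (K:Int) 1).foldl (fun a i =>
        (PySem.List.pyRange ((M:Int) - 1) 0 (-1)).foldl (fun a j => mset a i j (mget a i j - mget a i (j-1))) a) acc) k l =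
      if k < K ∧ 0 < l ∧ l < M then mgetN acc k l - mgetN acc k (l-1) else mgetN acc k l) := by
  induction K with
  | zero =>
    intro acc hlen hrow
    rw [PySem.List.pyRange_one_eq_nil (by omega)]
    refine ⟨rfl, fun k => rfl, fun k l => ?_⟩
    rw [if_neg (by omega)]
    rfl
  | succ K ih =>
    intro acc hlen hrow
    have e : ((K+1:Nat):Int) = ((K:Nat):Int) + 1 := by push_cast; ring
    rw [e, PySem.List.pyRange_one_succ_right (by omega), List.foldl_append, List.foldl_cons, List.foldl_nil]
    obtain ⟨h1, h2, h3⟩ := ih acc (by omega) (fun k hk => hrow k (by omega))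
    obtain ⟨s1, s2, s3⟩ := B_inner_row ((K:Nat):Int) M
      ((PySem.List.pyRange 0 (K:Int) 1).foldl (fun a i =>
        (PySem.List.pyRange ((M:Int) - 1) 0 (-1)).foldl (fun a j => mset a i j (mget a i j - mget a i (j-1))) a) acc)
      (by rw [h1]; omega) (by rw [Int.toNat_natCast, h2]; exact hrow K (by omega))
    simp only [Int.toNat_natCast] at s3
    refine ⟨by rw [s1, h1], fun k => by rw [s2, h2], fun k l => ?_⟩
    rw [s3 k l]
    by_cases hk : k = K
    · by_cases hl : 0 < l ∧ l < M
      · rw [if_pos ⟨hk, hl.1, hl.2⟩, hk, h3, if_neg (by omega), h3, if_neg (by omega), if_pos ⟨by omega, hl.1, hl.2⟩]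
      · rw [if_neg (by omega), h3]
        by_cases hkl : k < K ∧ 0 < l ∧ l < M
        · omega
        · rw [if_neg hkl, if_neg (by omega)]
    · rw [if_neg (by omega), h3]
      by_cases hkl : k < K ∧ 0 < l ∧ l < M
      · rw [if_pos hkl, if_pos ⟨by omega, hkl.2⟩]
      · rw [if_neg hkl, if_neg (by omega)]

theorem B_inner_col (i : Int) (M : Nat) : ∀ (acc : List (List Int)),
    0 < i → i.toNat < acc.length → M ≤ (acc.getD i.toNat []).length →
    ((PySem.List.pyRange 0 (M:Int) 1).foldl (fun a j => mset a i j (mget a i j - mget a (i-1) j)) acc).length = acc.length ∧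
    (∀ k, (((PySem.List.pyRange 0 (M:Int) 1).foldl (fun a j => mset a i j (mget a i j - mget a (i-1) j)) acc).getD k []).length = (acc.getD k []).length) ∧
    (∀ k l, mgetN ((PySem.List.pyRange 0 (M:Int) 1).foldl (fun a j => mset a i j (mget a i j - mget a (i-1) j)) acc) k l =
      if k = i.toNat ∧ l < M then mgetN acc k l - mgetN acc (k-1) l else mgetN acc k l) := by
  induction M with
  | zero =>
    intro acc hi0 hi hM
    rw [PySem.List.pyRange_one_eq_nil (by omega)]
    refine ⟨rfl, fun k => rfl, fun k l => ?_⟩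
    rw [if_neg (by omega)]
    rfl
  | succ M ih =>
    intro acc hi0 hi hM
    have e : ((M+1:Nat):Int) = ((M:Nat):Int) + 1 := by push_cast; ring
    rw [e, PySem.List.pyRange_one_succ_right (by omega), List.foldl_append, List.foldl_cons, List.foldl_nil]
    obtain ⟨h1, h2, h3⟩ := ih acc hi0 hi (by omega)
    have hib : i.toNat < ((PySem.List.pyRange 0 (M:Int) 1).foldl
        (fun a j => mset a i j (mget a i j - mget a (i-1) j)) acc).length := by rw [h1]; exact hi
    have hjb : ((M:Nat):Int).toNat < (((PySem.List.pyRange 0 (M:Int) 1).foldl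
        (fun a j => mset a i j (mget a i j - mget a (i-1) j)) acc).getD i.toNat []).length := by
      rw [Int.toNat_natCast, h2]; omega
    have s1 := length_mset ((PySem.List.pyRange 0 (M:Int) 1).foldl
        (fun a j => mset a i j (mget a i j - mget a (i-1) j)) acc) i ((M:Nat):Int)
      (mget ((PySem.List.pyRange 0 (M:Int) 1).foldl (fun a j => mset a i j (mget a i j - mget a (i-1) j)) acc) i ((M:Nat):Int) -
        mget ((PySem.List.pyRange 0 (M:Int) 1).foldl (fun a j => mset a i j (mget a i j - mget a (i-1) j)) acc) (i-1) ((M:Nat):Int))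
    have s2 := rowlen_mset ((PySem.List.pyRange 0 (M:Int) 1).foldl
        (fun a j => mset a i j (mget a i j - mget a (i-1) j)) acc) i ((M:Nat):Int)
      (mget ((PySem.List.pyRange 0 (M:Int) 1).foldl (fun a j => mset a i j (mget a i j - mget a (i-1) j)) acc) i ((M:Nat):Int) -
        mget ((PySem.List.pyRange 0 (M:Int) 1).foldl (fun a j => mset a i j (mget a i j - mget a (i-1) j)) acc) (i-1) ((M:Nat):Int))
    have s3 := fun k l => mgetN_mset ((PySem.List.pyRange 0 (M:Int) 1).foldl
        (fun a j => mset a i j (mget a i j - mget a (i-1) j)) acc) i ((M:Nat):Int)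
      (mget ((PySem.List.pyRange 0 (M:Int) 1).foldl (fun a j => mset a i j (mget a i j - mget a (i-1) j)) acc) i ((M:Nat):Int) -
        mget ((PySem.List.pyRange 0 (M:Int) 1).foldl (fun a j => mset a i j (mget a i j - mget a (i-1) j)) acc) (i-1) ((M:Nat):Int))
      k l hib hjb
    simp only [Int.toNat_natCast] at s3
    have ev : mget ((PySem.List.pyRange 0 (M:Int) 1).foldl (fun a j => mset a i j (mget a i j - mget a (i-1) j)) acc) i ((M:Nat):Int) -
        mget ((PySem.List.pyRange 0 (M:Int) 1).foldl (fun a j => mset a i j (mget a i j - mget a (i-1) j)) acc) (i-1) ((M:Nat):Int) =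
        mgetN acc i.toNat M - mgetN acc (i.toNat - 1) M := by
      rw [mget_eq, mget_eq, Int.toNat_natCast, h3, h3, if_neg (by omega), if_neg (by omega)]
      congr 2
      omega
    refine ⟨by rw [s1, h1], fun k => by rw [s2, h2], fun k l => ?_⟩
    rw [s3 k l]
    by_cases hk : k = i.toNat
    · by_cases hl : l < M
      · rw [if_neg (by omega), h3, if_pos ⟨hk, hl⟩, if_pos ⟨hk, by omega⟩]
      · by_cases hl2 : l = M
        · rw [if_pos ⟨hk, hl2⟩, ev, if_pos ⟨hk, by omega⟩, hk, hl2]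
        · rw [if_neg (by omega), h3, if_neg (by omega), if_neg (by omega)]
    · rw [if_neg (by omega), h3, if_neg (by omega), if_neg (by omega)]

theorem B_outer_col (M K : Nat) : ∀ (acc : List (List Int)),
    K ≤ acc.length → (∀ k, k < K → M ≤ (acc.getD k []).length) →
    ((PySem.List.pyRange ((K:Int) - 1) 0 (-1)).foldl (fun a i =>
        (PySem.List.pyRange 0 (M:Int) 1).foldl (fun a j => mset a i j (mget a i j - mget a (i-1) j)) a) acc).length = acc.length ∧
    (∀ k, (((PySem.List.pyRange ((K:Int) - 1) 0 (-1)).foldl (fun a i =>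
        (PySem.List.pyRange 0 (M:Int) 1).foldl (fun a j => mset a i j (mget a i j - mget a (i-1) j)) a) acc).getD k []).length = (acc.getD k []).length) ∧
    (∀ k l, mgetN ((PySem.List.pyRange ((K:Int) - 1) 0 (-1)).foldl (fun a i =>
        (PySem.List.pyRange 0 (M:Int) 1).foldl (fun a j => mset a i j (mget a i j - mget a (i-1) j)) a) acc) k l =
      if l < M ∧ 0 < k ∧ k < K then mgetN acc k l - mgetN acc (k-1) l else mgetN acc k l) := by
  induction K with
  | zero =>
    intro acc hlen hrow
    rw [PySem.List.pyRange_neg_one_eq_nil (a := ((0:Nat):Int) - 1) (by omega)]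
    refine ⟨rfl, fun k => rfl, fun k l => ?_⟩
    rw [if_neg (by omega)]
    rfl
  | succ K ih =>
    intro acc hlen hrow
    rcases Nat.eq_zero_or_pos K with hK0 | hK0
    · subst hK0
      rw [PySem.List.pyRange_neg_one_eq_nil (a := ((1:Nat):Int) - 1) (by omega)]
      refine ⟨rfl, fun k => rfl, fun k l => ?_⟩
      rw [if_neg (by omega)]
      rfl
    · have e : ((K+1:Nat):Int) - 1 = ((K:Nat):Int) := by push_cast; ring
      rw [e, PySem.List.pyRange_neg_one_cons (a := ((K:Nat):Int)) (by omega), List.foldl_cons]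
      obtain ⟨s1, s2, s3⟩ := B_inner_col ((K:Nat):Int) M acc (by omega) (by omega)
        (by rw [Int.toNat_natCast]; exact hrow K (by omega))
      simp only [Int.toNat_natCast] at s3
      obtain ⟨h1, h2, h3⟩ := ih ((PySem.List.pyRange 0 (M:Int) 1).foldl
          (fun a j => mset a ((K:Nat):Int) j (mget a ((K:Nat):Int) j - mget a (((K:Nat):Int)-1) j)) acc)
        (by rw [s1]; omega) (fun k hk => by rw [s2]; exact hrow k (by omega))
      refine ⟨by rw [h1, s1], fun k => by rw [h2, s2], fun k l => ?_⟩
      rw [h3 k l]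
      by_cases hk : 0 < k ∧ k < K
      · by_cases hl : l < M
        · rw [if_pos ⟨hl, hk.1, hk.2⟩, if_pos ⟨hl, hk.1, by omega⟩,
            s3, if_neg (by omega), s3, if_neg (by omega)]
        · rw [if_neg (by omega), if_neg (by omega), s3, if_neg (by omega)]
      · by_cases hk2 : k = K
        · rw [if_neg (by omega), s3, hk2]
          by_cases hl : l < M
          · rw [if_pos ⟨rfl, hl⟩, if_pos ⟨hl, by omega, by omega⟩]
          · rw [if_neg (by omega), if_neg (by omega)]
        · rw [if_neg (by omega), if_neg (by omega), s3, if_neg (by omega)]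

theorem eq_of_pointwise (b c : List (List Int)) (hlen : b.length = c.length)
    (hrow : ∀ k, (b.getD k []).length = (c.getD k []).length)
    (hval : ∀ k l, mgetN b k l = mgetN c k l) : b = c := by
  apply List.ext_getElem hlen
  intro k hk1 hk2
  apply List.ext_getElem
  · have h := hrow k
    rwa [List.getD_eq_getElem b [] hk1, List.getD_eq_getElem c [] hk2] at h
  · intro l hl1 hl2
    have h := hval k l
    unfold mgetN at h
    rwa [List.getD_eq_getElem b [] hk1, List.getD_eq_getElem c [] hk2,
      List.getD_eq_getElem _ 0 hl1, List.getD_eq_getElem _ 0 hl2] at h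

theorem main_equiv (n m : Int) (after : List (List Int)) (hpre : Pre_matrixRestoration n m after) :
    matrixRestoration n m after = matrixRestoration_alt n m after := by
  unfold matrixRestoration matrixRestoration_alt
  by_cases hn : 0 < n
  · by_cases hm : 0 < m
    · by_cases h11 : n = 1 ∧ m = 1
      · obtain ⟨e1, e2⟩ := h11
        subst e1; subst e2
        have q1 : PySem.List.pyRange ((1:Int)-1) (-1) (-1) = [0] := by decide
        have q2 : PySem.List.pyRange ((1:Int)-1) 0 (-1) = [] := by decide
        have q3 : PySem.List.pyRange 0 (1:Int) 1 = [0] := by decide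
        simp only [q1, q2, q3, List.foldl_cons, List.foldl_nil]
        simp [stepA]
      obtain ⟨hlen, htake⟩ := hpre hn hm (by omega)
      have hrow : ∀ k, k < n.toNat → m.toNat ≤ (after.getD k []).length := by
        intro k hk
        have hkL : k < after.length := by omega
        have hlt : k < (after.take n.toNat).length := by simp [List.length_take]; omega
        have hmem : after[k] ∈ after.take n.toNat := by
          have h := List.getElem_mem hlt
          rwa [List.getElem_take] at h
        have h2 := htake _ hmem
        rw [List.getD_eq_getElem after [] hkL]
        omega
      have en : n = ((n.toNat:Nat):Int) := by omega
      have em : m = ((m.toNat:Nat):Int) := by omega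
      rw [en, em]
      obtain ⟨a1, a2, a3⟩ := A_outer m.toNat n.toNat after (by omega) hrow
      obtain ⟨r1, r2, r3⟩ := B_outer_row m.toNat n.toNat after (by omega) hrow
      obtain ⟨c1, c2, c3⟩ := B_outer_col m.toNat n.toNat
        ((PySem.List.pyRange 0 ((n.toNat:Nat):Int) 1).foldl (fun a i =>
          (PySem.List.pyRange (((m.toNat:Nat):Int) - 1) 0 (-1)).foldl
            (fun a j => mset a i j (mget a i j - mget a i (j-1))) a) after)
        (by rw [r1]; omega) (fun k hk => by rw [r2]; exact hrow k hk)
      apply eq_of_pointwise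
      · rw [a1, c1, r1]
      · intro k; rw [a2 k, c2 k, r2 k]
      · intro k l
        rw [a3 k l, c3 k l, r3 k l, r3 (k-1) l]
        unfold dval
        split_ifs <;> (try ring) <;> omega
    · have eA : PySem.List.pyRange (m-1) (-1) (-1) = [] := PySem.List.pyRange_neg_one_eq_nil (by omega)
      have eB1 : PySem.List.pyRange (m-1) 0 (-1) = [] := PySem.List.pyRange_neg_one_eq_nil (by omega)
      have eB2 : PySem.List.pyRange 0 m 1 = [] := PySem.List.pyRange_one_eq_nil (by omega)
      simp only [eA, eB1, eB2, List.foldl_nil]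
      rw [foldl_id, foldl_id, foldl_id]
  · have eA : PySem.List.pyRange (n-1) (-1) (-1) = [] := PySem.List.pyRange_neg_one_eq_nil (by omega)
    have eB1 : PySem.List.pyRange 0 n 1 = [] := PySem.List.pyRange_one_eq_nil (by omega)
    have eB2 : PySem.List.pyRange (n-1) 0 (-1) = [] := PySem.List.pyRange_neg_one_eq_nil (by omega)
    simp only [eA, eB1, eB2, List.foldl_nil]

-- ===== VERDICT (by name: the statement is the Claim_ definition above) =====
theorem matrixRestoration_spec : Claim_equal_matrixRestoration := by
  unfold Claim_equal_matrixRestoration Spec_matrixRestoration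
  exact fun n m after _ hpre => main_equiv n m after hpre
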